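-- pv_equiv track=rewrite | github.com/jinno0/github-actions-actions | scripts/generate_adoption_report.py | calculate_action_usage
-- ===== SOURCE A (Python) =====
-- from collections import defaultdict
--
-- def calculate_action_usage(events: list) -> dict:
--     """
--     Calculate action usage breakdown.
--
--     Args:
--         events: List of telemetry events
--
--     Returns:
--         Dictionary mapping action names to number of unique repositories
--     """
--     action_repos = defaultdict(set)
--
--     for event in events:
--         action = event.get("action_name")
--         repo_id = event.get("repository_anonymous_id")
--         if action and repo_id and repo_id != "unknown":
--             action_repos[action].add(repo_id)
--
--     # Convert sets to counts
--     return {action: len(repos) for action, repos in action_repos.items()}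
-- ===== SOURCE B (Python) =====
-- def calculate_action_usage(events: list) -> dict:
--     """
--     Calculate action usage breakdown (staged-passes re-implementation).
--
--     Stage 1: extract the qualifying (action, repo) pairs into a flat list.
--     Stage 2: take the action names in order of first occurrence.
--     Stage 3: for each action, count its distinct repos by scanning the pair
--     list with a comprehension — no incremental per-action set is maintained.
--     """
--     pairs = []
--     for event in events:
--         action = event.get("action_name")
--         repo_id = event.get("repository_anonymous_id")
--         if action and repo_id and repo_id != "unknown":
--             pairs.append((action, repo_id))
--     actions = list(dict.fromkeys(a for a, _ in pairs))
--     return {a: len({r for a2, r in pairs if a2 == a}) for a in actions}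
-- ===== Notes on version B (the rewrite author's own statement) =====
-- stated objective: alternative
-- what changed: A groups incrementally during the event scan, maintaining a dict mapping each action to a growing set of repos, then converts sets to lengths; B never groups during the scan: it first flattens the events to a list of qualifying (action, repo) pairs, then for each first-occurrence action name re-scans that pair list and counts its distinct repos with a per-action set comprehension.
import Mathlib
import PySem

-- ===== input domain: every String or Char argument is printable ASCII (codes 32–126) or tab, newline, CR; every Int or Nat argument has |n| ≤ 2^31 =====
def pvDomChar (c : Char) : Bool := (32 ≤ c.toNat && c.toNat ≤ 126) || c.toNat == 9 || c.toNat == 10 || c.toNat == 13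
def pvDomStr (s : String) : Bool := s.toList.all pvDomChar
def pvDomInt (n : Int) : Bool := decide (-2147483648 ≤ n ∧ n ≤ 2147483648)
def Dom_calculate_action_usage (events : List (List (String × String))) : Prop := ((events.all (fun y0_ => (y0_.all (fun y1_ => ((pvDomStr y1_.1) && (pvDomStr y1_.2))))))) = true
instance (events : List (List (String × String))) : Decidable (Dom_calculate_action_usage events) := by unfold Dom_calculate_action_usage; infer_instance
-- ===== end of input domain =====

-- B replaces A's incremental dict-of-sets grouping with staged passes: flatten to qualifying
-- (action, repo) pairs, then count distinct repos per action by re-scanning the pair list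
-- (objective: alternative decomposition; not claimed faster).

-- ===== PORT A =====
-- A: defaultdict(set) keyed by action, sets of repo ids, then a comprehension taking len of each set.
def calculate_action_usage (events : List (List (String × String))) : List (String × Int) :=
  let action_repos : PySem.Dict String (PySem.Set String) :=
    events.foldl (fun d event =>
      let ev := PySem.Dict.ofList event
      match ev.get? "action_name", ev.get? "repository_anonymous_id" with
      | some action, some repo_id =>
          if action ≠ "" ∧ repo_id ≠ "" ∧ repo_id ≠ "unknown" then
            d.modify action PySem.Set.empty (fun s => PySem.Set.add s repo_id)
          else d
      | _, _ => d) PySem.Dict.empty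
  action_repos.items.map (fun p => (p.1, PySem.Set.len p.2))

-- ===== PORT B =====
-- B: flatten events into the list of qualifying (action, repo) pairs; actions in first-occurrence
-- order (dict.fromkeys); per action, count distinct repos by a set comprehension over the pair list.
def calculate_action_usage_alt (events : List (List (String × String))) : List (String × Int) :=
  let pairs : List (String × String) :=
    events.foldl (fun ps event =>
      let ev := PySem.Dict.ofList event
      match ev.get? "action_name" with
      | none => ps
      | some action =>
        match ev.get? "repository_anonymous_id" with
        | none => ps
        | some repo_id =>
          if action ≠ "" ∧ repo_id ≠ "" ∧ repo_id ≠ "unknown" then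
            ps ++ [(action, repo_id)]
          else ps) []
  let actions : List String := PySem.Set.ofList (pairs.map Prod.fst)
  actions.map (fun a =>
    (a, PySem.Set.len (PySem.Set.ofList ((pairs.filter (fun p => p.1 == a)).map Prod.snd))))

-- ===== PRECONDITION & SPEC =====
def Spec_calculate_action_usage (events : List (List (String × String))) (out : List (String × Int)) : Prop := out = calculate_action_usage_alt events
instance (events : List (List (String × String))) (out : List (String × Int)) : Decidable (Spec_calculate_action_usage events out) := by unfold Spec_calculate_action_usage; infer_instance

-- ===== CLAIM =====
def Claim_equal_calculate_action_usage : Prop := ∀ (events : List (List (String × String))), Dom_calculate_action_usage events → Spec_calculate_action_usage events (calculate_action_usage events)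

-- ===== LEMMAS AND PROOFS =====

-- the (action, repo) pair an event contributes, if any (the shared guard of both programs)
def evPair (event : List (String × String)) : Option (String × String) :=
  let ev := PySem.Dict.ofList event
  match ev.get? "action_name", ev.get? "repository_anonymous_id" with
  | some action, some repo_id =>
      if action ≠ "" ∧ repo_id ≠ "" ∧ repo_id ≠ "unknown" then some (action, repo_id) else none
  | _, _ => none

-- A's loop body, on the contributed pairs
def stepA (d : PySem.Dict String (PySem.Set String)) (p : String × String) : PySem.Dict String (PySem.Set String) :=
  d.modify p.1 PySem.Set.empty (fun s => PySem.Set.add s p.2)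

lemma foldA_eq (events : List (List (String × String))) (d : PySem.Dict String (PySem.Set String)) :
    events.foldl (fun d event =>
      let ev := PySem.Dict.ofList event
      match ev.get? "action_name", ev.get? "repository_anonymous_id" with
      | some action, some repo_id =>
          if action ≠ "" ∧ repo_id ≠ "" ∧ repo_id ≠ "unknown" then
            d.modify action PySem.Set.empty (fun s => PySem.Set.add s repo_id)
          else d
      | _, _ => d) d
    = (events.filterMap evPair).foldl stepA d := by
  rw [List.foldl_filterMap]
  induction events generalizing d with
  | nil => rfl
  | cons e es ih =>
      simp only [List.foldl_cons]
      rw [ih]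
      congr 1
      unfold evPair stepA
      rcases h1 : (PySem.Dict.ofList e).get? "action_name" with _ | a <;>
        rcases h2 : (PySem.Dict.ofList e).get? "repository_anonymous_id" with _ | r <;>
        (simp [h1, h2]; (try split)) <;> rfl

lemma foldB_eq (events : List (List (String × String))) (ps : List (String × String)) :
    events.foldl (fun ps event =>
      let ev := PySem.Dict.ofList event
      match ev.get? "action_name" with
      | none => ps
      | some action =>
        match ev.get? "repository_anonymous_id" with
        | none => ps
        | some repo_id =>
          if action ≠ "" ∧ repo_id ≠ "" ∧ repo_id ≠ "unknown" then
            ps ++ [(action, repo_id)]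
          else ps) ps
    = ps ++ events.filterMap evPair := by
  induction events generalizing ps with
  | nil => simp
  | cons e es ih =>
      simp only [List.foldl_cons, List.filterMap_cons]
      have hstep : ∀ q : Option (String × String),
          evPair e = q →
          (match (PySem.Dict.ofList e).get? "action_name" with
           | none => ps
           | some action =>
             match (PySem.Dict.ofList e).get? "repository_anonymous_id" with
             | none => ps
             | some repo_id =>
               if action ≠ "" ∧ repo_id ≠ "" ∧ repo_id ≠ "unknown" then
                 ps ++ [(action, repo_id)]
               else ps)
          = ps ++ q.toList := by
        intro q hq
        unfold evPair at hq
        rcases h1 : (PySem.Dict.ofList e).get? "action_name" with _ | a <;>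
          rcases h2 : (PySem.Dict.ofList e).get? "repository_anonymous_id" with _ | r <;>
          simp [h1, h2] at hq ⊢ <;> subst hq <;> (try split) <;> simp
      rcases hq : evPair e with _ | p <;>
        rw [ih, hstep _ hq] <;> simp [List.append_assoc]

-- A's per-action set, characterized
lemma getD_foldA (L : List (String × String)) :
    ∀ (d : PySem.Dict String (PySem.Set String)) (a : String),
    (L.foldl stepA d).getD a PySem.Set.empty
      = PySem.Set.update (d.getD a PySem.Set.empty) ((L.filter (fun p => p.1 == a)).map Prod.snd) := by
  induction L with
  | nil => intro d a; simp [PySem.Set.update_nil]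
  | cons p L ih =>
      intro d a
      simp only [List.foldl_cons]
      rw [ih]
      by_cases hpa : p.1 = a
      · have : (stepA d p).getD a PySem.Set.empty
            = PySem.Set.add (d.getD a PySem.Set.empty) p.2 := by
          unfold stepA PySem.Dict.modify
          rw [hpa, PySem.Dict.getD_insert_self]
        rw [this]
        simp [hpa, PySem.Set.update]
      · have h1 : (stepA d p).getD a PySem.Set.empty = d.getD a PySem.Set.empty := by
          unfold stepA PySem.Dict.modify
          exact PySem.Dict.getD_insert_of_ne _ _ _ (fun h => hpa h.symm)
        have hb : (p.1 == a) = false := by simp [hpa]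
        rw [h1]
        simp [hb]

-- ===== VERDICT =====
theorem calculate_action_usage_spec : Claim_equal_calculate_action_usage := by
  intro events _
  unfold Spec_calculate_action_usage
  unfold calculate_action_usage calculate_action_usage_alt
  rw [foldA_eq, foldB_eq]
  simp only [List.nil_append]
  set L := events.filterMap evPair with hL
  -- A's items as a map over its (nodup) keys
  have hkA : (L.foldl stepA PySem.Dict.empty).keys = PySem.Set.ofList (L.map Prod.fst) :=
    PySem.Dict.keys_foldl_modify_key L Prod.fst PySem.Set.empty (fun _ p => fun s => PySem.Set.add s p.2) PySem.Dict.empty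
  have hndA : (L.foldl stepA PySem.Dict.empty).keys.Nodup := by
    rw [hkA]; exact PySem.Set.nodup_ofList _
  have hitemsA : (L.foldl stepA PySem.Dict.empty).items
      = (PySem.Set.ofList (L.map Prod.fst)).map
          (fun a => (a, (L.foldl stepA PySem.Dict.empty).getD a PySem.Set.empty)) := by
    rw [← hkA]
    exact PySem.Dict.items_eq_map_keys _ hndA PySem.Set.empty
  rw [hitemsA, List.map_map]
  apply List.map_congr_left
  intro a _
  refine Prod.ext rfl ?_
  show PySem.Set.len ((L.foldl stepA PySem.Dict.empty).getD a PySem.Set.empty)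
      = PySem.Set.len (PySem.Set.ofList ((L.filter (fun p => p.1 == a)).map Prod.snd))
  rw [getD_foldA]
  rfl
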